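-- pv_equiv track=rewrite | github.com/Nixtla/blog | scripts/qmd_to_notebook.py | remove_frontmatter
-- ===== SOURCE A (Python) =====
-- def remove_frontmatter(lines):
--     """Remove YAML frontmatter and return set of line numbers to skip."""
--     skip_lines = set()
--     in_frontmatter = False
--
--     for i, line in enumerate(lines):
--         if i == 0 and line.strip() == "---":
--             in_frontmatter = True
--             skip_lines.add(i)
--         elif in_frontmatter:
--             skip_lines.add(i)
--             if line.strip() == "---":
--                 in_frontmatter = False
--                 break
--
--     return skip_lines
-- ===== SOURCE B (Python) =====
-- def remove_frontmatter(lines):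
--     """Remove YAML frontmatter and return set of line numbers to skip."""
--     fence = [line.strip() == "---" for line in lines]
--     if not fence or not fence[0]:
--         return set()
--     counts = [0]
--     for f in fence:
--         counts.append(counts[-1] + f)
--     return {i for i in range(len(lines)) if counts[i] < 2}
-- ===== Notes on version B (the rewrite author's own statement) =====
-- stated objective: alternative
-- what changed: B characterizes the skip set by prefix counts of fence lines -- it precomputes cumulative counts of '---' lines and keeps exactly the indices whose prefix count is below 2 -- instead of A's stateful scan that toggles an in_frontmatter flag and breaks at the closing fence.
import Mathlib
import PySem

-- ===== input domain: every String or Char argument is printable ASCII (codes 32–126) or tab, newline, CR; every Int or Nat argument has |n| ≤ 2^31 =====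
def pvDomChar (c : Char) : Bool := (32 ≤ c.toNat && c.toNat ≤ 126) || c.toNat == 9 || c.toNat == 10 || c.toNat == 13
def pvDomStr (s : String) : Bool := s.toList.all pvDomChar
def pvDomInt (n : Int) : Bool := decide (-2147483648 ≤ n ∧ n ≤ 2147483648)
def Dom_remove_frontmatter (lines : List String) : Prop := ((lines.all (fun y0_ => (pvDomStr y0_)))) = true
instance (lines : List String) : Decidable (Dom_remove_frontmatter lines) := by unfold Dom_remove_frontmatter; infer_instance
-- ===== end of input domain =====

-- B keeps an index iff fewer than two '---' fence lines occur in the strict prefix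
-- (a cumulative-count characterization), instead of A's flag-driven scan with break; objective: alternative.

-- ===== PORT A =====
-- A's for-loop over enumerate(lines) with state (skip_lines, in_frontmatter); the
-- 'break' is rendered by returning the accumulator instead of recursing.
def remove_frontmatter_loop (l : List String) (i : Nat) (skip : List Int) (inFm : Bool) : List Int :=
  match l with
  | [] => skip
  | line :: rest =>
    if i == 0 && PySem.Str.strip line == "---" then
      remove_frontmatter_loop rest (i + 1) (skip ++ [(i : Int)]) true
    else if inFm then
      let skip' := skip ++ [(i : Int)]
      if PySem.Str.strip line == "---" then skip'   -- break
      else remove_frontmatter_loop rest (i + 1) skip' inFm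
    else
      remove_frontmatter_loop rest (i + 1) skip inFm

def remove_frontmatter (lines : List String) : List Int :=
  remove_frontmatter_loop lines 0 [] false

-- ===== PORT B =====
-- Source B's 'for f in fence: counts.append(counts[-1] + f)' loop: emits the cumulative counts.
def pvCountsB : List Bool → Nat → List Nat
  | [], _ => []
  | f :: rest, c =>
    let c' := c + (if f then 1 else 0)
    c' :: pvCountsB rest c'

def remove_frontmatter_alt (lines : List String) : List Int :=
  let fence := lines.map (fun l => PySem.Str.strip l == "---")
  match fence with
  | [] => []  -- 'not fence'
  | f0 :: _ =>
    if !f0 then []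
    else
      let counts := 0 :: pvCountsB fence 0   -- counts = [0]; then the append loop
      -- comprehension {i for i in range(len(lines)) if counts[i] < 2}; i < len(counts) always
      ((List.range lines.length).filter (fun i => decide (counts.getD i 0 < 2))).map Int.ofNat

-- ===== PRECONDITION & SPEC =====
def Spec_remove_frontmatter (lines : List String) (out : List Int) : Prop := out = remove_frontmatter_alt lines
instance (lines : List String) (out : List Int) : Decidable (Spec_remove_frontmatter lines out) := by unfold Spec_remove_frontmatter; infer_instance

-- ===== CLAIM =====
def Claim_equal_remove_frontmatter : Prop := ∀ (lines : List String), Dom_remove_frontmatter lines → Spec_remove_frontmatter lines (remove_frontmatter lines)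

-- ===== LEMMAS AND PROOFS =====

theorem range_cast_shift (n : Nat) :
    ([(0 : Int)] ++ (List.range n).map (fun t => ((1 + t : Nat) : Int))) =
      (List.range (n + 1)).map (fun t => Int.ofNat t) := by
  rw [List.range_succ_eq_map, List.map_cons, List.map_map]
  simp [Function.comp, Nat.add_comm]

-- With in_frontmatter = false and i ≠ 0, A's loop never adds anything.
theorem loop_false (l : List String) (i : Nat) (skip : List Int) (hi : i ≠ 0) :
    remove_frontmatter_loop l i skip false = skip := by
  induction l generalizing i skip with
  | nil => rfl
  | cons a rest ih =>
      simp only [remove_frontmatter_loop]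
      have : (i == 0) = false := by simpa using hi
      simp [this]
      exact ih (i + 1) skip (Nat.succ_ne_zero i)

-- With in_frontmatter = true and i ≠ 0, the loop appends i, i+1, … up to and
-- including the first closing '---' (or to the end of the list if none).
theorem loop_true (l : List String) (i : Nat) (skip : List Int) (hi : i ≠ 0) :
    remove_frontmatter_loop l i skip true =
      skip ++ (List.range (match l.findIdx? (fun s => PySem.Str.strip s == "---") with
                           | some k => k + 1
                           | none => l.length)).map (fun t => ((i + t : Nat) : Int)) := by
  induction l generalizing i skip with
  | nil => simp [remove_frontmatter_loop]
  | cons a rest ih =>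
      simp only [remove_frontmatter_loop]
      have h0 : (i == 0) = false := by simpa using hi
      by_cases ha : PySem.Str.strip a == "---"
      · simp [h0, ha, List.findIdx?_cons, List.range_succ]
      · have hc : ¬((i == 0 && (PySem.Str.strip a == "---")) = true) := by simp [h0]
        rw [if_neg hc, if_pos trivial, if_neg (by simpa using ha),
            ih (i + 1) _ (Nat.succ_ne_zero i)]
        simp only [List.findIdx?_cons, ha]
        cases hr : rest.findIdx? (fun s => PySem.Str.strip s == "---") with
        | none =>
            simp [List.range_succ_eq_map, List.map_map, List.append_assoc, Function.comp]
            intro t ht; omega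
        | some k =>
            simp [List.range_succ_eq_map, List.map_map, List.append_assoc, Function.comp]
            intro t ht; omega

-- pvCountsB emits partial sums: entry i is c plus the number of trues in the first i+1 entries.
theorem pvCountsB_getD (bs : List Bool) (c i : Nat) (h : i < bs.length) :
    (pvCountsB bs c).getD i 0 = c + ((bs.take (i + 1)).count true) := by
  induction bs generalizing c i with
  | nil => simp at h
  | cons f rest ih =>
      cases i with
      | zero => cases f <;> simp [pvCountsB]
      | succ j =>
          have hj : j < rest.length := by simpa using h
          simp only [pvCountsB, List.getD_cons_succ, List.take_succ_cons, List.count_cons]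
          rw [ih _ j hj]
          cases f <;> simp <;> omega

-- No fence among the first j lines iff the first fence index (if any) is ≥ j.
theorem count_take_findIdx (p : String → Bool) (rest : List String) (j : Nat)
    (h : j ≤ rest.length) :
    (((rest.map p).take j).count true = 0) ↔
      (match rest.findIdx? p with | some k => j ≤ k | none => True) := by
  induction rest generalizing j with
  | nil =>
      have hj : j = 0 := Nat.le_zero.mp h
      subst hj
      simp
  | cons a rs ih =>
      cases j with
      | zero => cases hr : (a :: rs).findIdx? p <;> simp
      | succ j' =>
          have hj : j' ≤ rs.length := by simpa using h
          have H := ih j' hj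
          by_cases ha : p a = true
          · simp [List.findIdx?_cons, ha]
          · have hpa : p a = false := by simpa using ha
            simp only [List.map_cons, List.take_succ_cons, List.count_cons,
              List.findIdx?_cons, hpa]
            cases hr : rs.findIdx? p with
            | none =>
                rw [hr] at H
                simp only at H
                simpa using H
            | some k =>
                rw [hr] at H
                simp only at H
                constructor
                · intro h0
                  have h1 : ((rs.map p).take j').count true = 0 := by
                    simp at h0; omega
                  have := H.mp h1
                  simp; omega
                · intro hle
                  simp only [Option.map_some] at hle
                  have h2 : j' ≤ k := by
                    simp at hle; omega
                  have := H.mpr h2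
                  simp [this]

-- filtering range n by a predicate equivalent to (· < m) yields range m
theorem filter_range_lt (n : Nat) (p : Nat → Bool) :
    ∀ m, m ≤ n → (∀ i, i < n → (p i = true ↔ i < m)) →
      (List.range n).filter p = List.range m := by
  induction n with
  | zero =>
      intro m hm _
      have : m = 0 := Nat.le_zero.mp hm
      subst this; rfl
  | succ n ih =>
      intro m hm h
      rw [List.range_succ, List.filter_append]
      by_cases hmn : m = n + 1
      · subst hmn
        have hpn : p n = true := (h n (Nat.lt_succ_self n)).2 (Nat.lt_succ_self n)
        rw [ih n (Nat.le_refl n) (fun i hi => by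
              constructor
              · intro _; exact hi
              · intro _; exact (h i (Nat.lt_succ_of_lt hi)).2 (Nat.lt_succ_of_lt hi))]
        simp [hpn, List.range_succ]
      · have hm' : m ≤ n := by omega
        have hpn : p n = false := by
          by_contra hc
          have : n < m := (h n (Nat.lt_succ_self n)).1 (by simpa using hc)
          omega
        rw [ih m hm' (fun i hi => h i (Nat.lt_succ_of_lt hi))]
        simp [hpn]

-- first fence index is within the list
theorem findIdx?_lt_length (p : String → Bool) (l : List String) (k : Nat)
    (h : l.findIdx? p = some k) : k < l.length := by
  induction l generalizing k with
  | nil => simp at h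
  | cons a rs ih =>
      rw [List.findIdx?_cons] at h
      by_cases ha : p a = true
      · simp [ha] at h
        simp [← h]
      · simp [ha] at h
        obtain ⟨k', hk', rfl⟩ := h
        have := ih k' hk'
        simp; omega

-- ===== VERDICT =====
theorem remove_frontmatter_spec : Claim_equal_remove_frontmatter := by
  intro lines _
  unfold Spec_remove_frontmatter
  cases lines with
  | nil => rfl
  | cons first rest =>
      by_cases hf : PySem.Str.strip first = "---"
      · -- A side, via loop_true
        have h1 : remove_frontmatter (first :: rest) =
            remove_frontmatter_loop rest 1 [(0 : Int)] true := by
          simp [remove_frontmatter, remove_frontmatter_loop, hf]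
        rw [h1, loop_true rest 1 _ one_ne_zero]
        -- B side
        have hB : remove_frontmatter_alt (first :: rest) =
            ((List.range (rest.length + 1)).filter
              (fun i => decide ((0 :: pvCountsB ((first :: rest).map
                  (fun l => PySem.Str.strip l == "---")) 0).getD i 0 < 2))).map Int.ofNat := by
          simp [remove_frontmatter_alt, hf]
        rw [hB]
        set p : String → Bool := fun l => PySem.Str.strip l == "---" with hp
        set M : Nat := (match rest.findIdx? p with | some k => k + 2 | none => rest.length + 1)
          with hM
        have hMle : M ≤ rest.length + 1 := by
          rw [hM]
          cases hr : rest.findIdx? p with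
          | none => simp
          | some k => have := findIdx?_lt_length p rest k hr; simp; omega
        have hfilter :
            (List.range (rest.length + 1)).filter
              (fun i => decide ((0 :: pvCountsB ((first :: rest).map p) 0).getD i 0 < 2)) =
              List.range M := by
          apply filter_range_lt (rest.length + 1) _ M hMle
          intro i hi
          cases i with
          | zero =>
              have h1M : 0 < M := by
                rw [hM]
                cases rest.findIdx? p with
                | none => simp
                | some k => simp
              simp [h1M]
          | succ j =>
              have hj : j < ((first :: rest).map p).length := by simp; omega
              have hcnt := pvCountsB_getD ((first :: rest).map p) 0 j hj
              have hhead : ((first :: rest).map p) = true :: rest.map p := by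
                simp [hp, hf]
              rw [hhead] at hcnt
              simp only [List.take_succ_cons] at hcnt
              rw [List.count_cons] at hcnt
              simp only [beq_self_eq_true, if_true] at hcnt
              rw [List.getD_cons_succ, hhead, hcnt]
              have hfind := count_take_findIdx p rest j (by omega)
              rw [hM]
              cases hr : rest.findIdx? p with
              | none =>
                  rw [hr] at hfind
                  simp only at hfind
                  simp only [decide_eq_true_eq]
                  constructor
                  · intro _; omega
                  · intro _
                    have h0 : ((rest.map p).take j).count true = 0 := hfind.mpr trivial
                    simp [h0]
              | some k =>
                  rw [hr] at hfind
                  simp only at hfind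
                  simp only [decide_eq_true_eq]
                  constructor
                  · intro hlt
                    have h0 : ((rest.map p).take j).count true = 0 := by
                      simp at hlt; omega
                    have := hfind.mp h0; omega
                  · intro hlt
                    have h0 := hfind.mpr (by omega)
                    simp [h0]
        rw [hfilter, hM]
        cases hr : rest.findIdx? p with
        | none => exact range_cast_shift rest.length
        | some k => exact range_cast_shift (k + 1)
      · have h1 : remove_frontmatter (first :: rest) =
            remove_frontmatter_loop rest 1 [] false := by
          simp [remove_frontmatter, remove_frontmatter_loop, hf]
        rw [h1, loop_false rest 1 [] one_ne_zero]
        simp [remove_frontmatter_alt, hf]
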